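-- pv_equiv track=rewrite | github.com/danialrami/resume | scripts/render_latex.py | render_certifications_latex
-- ===== SOURCE A (Python) =====
-- def escape_latex(text: str) -> str:
--     """Escape special LaTeX characters."""
--     if not text:
--         return ''
--
--     # Convert to string if number
--     if isinstance(text, (int, float)):
--         text = str(text)
--
--     replacements = [
--         ('&', r'\&'),
--         ('%', r'\%'),
--         ('$', r'\$'),
--         ('#', r'\#'),
--         ('_', r'\_'),
--         ('{', r'\{'),
--         ('}', r'\}'),
--         ('~', r'\textasciitilde{}'),
--         ('^', r'\textasciicircum{}'),
--     ]
--     for old, new in replacements: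
--         text = text.replace(old, new)
--     return text
--
-- def render_certifications_latex(certifications: list) -> str:
--     """Render certifications section."""
--     if not certifications:
--         return ''
--
--     # Extract certification names
--     cert_names = ', '.join(escape_latex(str(cert.get('name', ''))) for cert in certifications)
--
--     lines = []
--     lines.append('\\resumeEducationHeading')
--     lines.append(f'{{Certifications}}{{}}')
--     lines.append(f'{{{cert_names}}}{{}}')
--
--     return '\n'.join(lines)
-- ===== SOURCE B (Python) =====
-- _TABLE = str.maketrans({
--     '&': r'\&',
--     '%': r'\%',
--     '$': r'\$',
--     '#': r'\#',
--     '_': r'\_',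
--     '{': r'\{',
--     '}': r'\}',
--     '~': r'\textasciitilde{}',
--     '^': r'\textasciicircum{}',
-- })
--
--
-- def escape_latex(text: str) -> str:
--     """Escape special LaTeX characters in one translate pass."""
--     if not text:
--         return ''
--     if isinstance(text, (int, float)):
--         text = str(text)
--     return text.translate(_TABLE)
--
--
-- def render_certifications_latex(certifications: list) -> str:
--     """Render certifications section."""
--     if not certifications:
--         return ''
--     cert_names = ', '.join(escape_latex(str(c.get('name', ''))) for c in certifications)
--     return '\\resumeEducationHeading\n{Certifications}{}\n{' + cert_names + '}{}'
-- ===== Notes on version B (the rewrite author's own statement) =====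
-- stated objective: idiomatic
-- what changed: escape_latex's nine sequential full-string .replace passes are replaced by one str.translate pass over a precomputed character table, and the three-line list/join assembly is replaced by a single literal string concatenation.
import Mathlib
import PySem

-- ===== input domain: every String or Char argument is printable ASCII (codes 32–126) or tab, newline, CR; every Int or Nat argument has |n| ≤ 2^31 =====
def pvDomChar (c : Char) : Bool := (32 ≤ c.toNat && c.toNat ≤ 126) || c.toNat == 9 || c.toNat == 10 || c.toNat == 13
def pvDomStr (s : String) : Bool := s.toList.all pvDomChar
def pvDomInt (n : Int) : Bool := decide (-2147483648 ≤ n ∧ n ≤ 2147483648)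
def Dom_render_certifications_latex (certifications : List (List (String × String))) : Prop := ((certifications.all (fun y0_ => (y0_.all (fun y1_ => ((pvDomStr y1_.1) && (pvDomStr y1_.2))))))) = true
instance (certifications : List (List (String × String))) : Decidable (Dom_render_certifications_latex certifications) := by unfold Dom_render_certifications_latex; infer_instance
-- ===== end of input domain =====

-- ===== PORT A =====
-- B replaces escape_latex's nine sequential .replace passes with one character-table
-- (translate) pass and inlines the three-line join; objective: idiomatic. Same return value.

-- A's `replacements` list.
def pvReplacements : List (String × String) :=
  [("&", "\\&"), ("%", "\\%"), ("$", "\\$"), ("#", "\\#"), ("_", "\\_"),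
   ("{", "\\{"), ("}", "\\}"), ("~", "\\textasciitilde{}"), ("^", "\\textasciicircum{}")]

-- A's escape_latex: empty-string early return, then the replace loop
-- (the isinstance(int/float) branch is dead for a str argument and is not ported).
def escape_latexA (text : String) : String :=
  if text = "" then ""
  else pvReplacements.foldl (fun t p => PySem.Str.replace t p.1 p.2) text

-- cert.get('name', ''): first-match lookup in the association list (dict convention);
-- str(...) on the looked-up string is the identity.
def pvGetName (cert : List (String × String)) : String :=
  ((cert.find? (fun p => p.1 == "name")).map Prod.snd).getD ""

def render_certifications_latex (certifications : List (List (String × String))) : String :=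
  if certifications = [] then ""
  else
    let cert_names :=
      PySem.Str.join ", " (certifications.map (fun cert => escape_latexA (pvGetName cert)))
    PySem.Str.join "\n"
      ["\\resumeEducationHeading", "{Certifications}{}", "{" ++ cert_names ++ "}{}"]

-- ===== PORT B =====
-- B's translation table as a per-character mapping (str.maketrans / translate).
def pvEscChar (c : Char) : List Char :=
  if c = '&' then "\\&".toList
  else if c = '%' then "\\%".toList
  else if c = '$' then "\\$".toList
  else if c = '#' then "\\#".toList
  else if c = '_' then "\\_".toList
  else if c = '{' then "\\{".toList
  else if c = '}' then "\\}".toList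
  else if c = '~' then "\\textasciitilde{}".toList
  else if c = '^' then "\\textasciicircum{}".toList
  else [c]

-- B's escape_latex: one translate pass.
def escape_latexB (text : String) : String :=
  if text = "" then "" else String.ofList (text.toList.flatMap pvEscChar)

def render_certifications_latex_alt (certifications : List (List (String × String))) : String :=
  if certifications = [] then ""
  else
    let cert_names :=
      PySem.Str.join ", " (certifications.map (fun cert => escape_latexB (pvGetName cert)))
    "\\resumeEducationHeading\n{Certifications}{}\n{" ++ cert_names ++ "}{}"

-- ===== PRECONDITION & SPEC =====
def Spec_render_certifications_latex (certifications : List (List (String × String))) (out : String) : Prop := out = render_certifications_latex_alt certifications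
instance (certifications : List (List (String × String))) (out : String) : Decidable (Spec_render_certifications_latex certifications out) := by unfold Spec_render_certifications_latex; infer_instance

-- ===== CLAIM (what is proved, stated in full; the proofs are below) =====
def Claim_equal_render_certifications_latex : Prop := ∀ (certifications : List (List (String × String))), Dom_render_certifications_latex certifications → Spec_render_certifications_latex certifications (render_certifications_latex certifications)

-- ===== LEMMAS AND PROOFS =====

-- replace.go with a single-character pattern and enough fuel is a per-character flatMap.
theorem pvGoSingle (o : Char) (new : List Char) :
    ∀ (l acc : List Char) (fuel : Nat), l.length ≤ fuel →
      PySem.Chars.replace.go [o] new fuel l acc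
        = acc.reverse ++ l.flatMap (fun c => if c = o then new else [c]) := by
  intro l
  induction l with
  | nil =>
    intro acc fuel _
    cases fuel <;> simp [PySem.Chars.replace.go]
  | cons c t ih =>
    intro acc fuel hf
    cases fuel with
    | zero => simp at hf
    | succ n =>
      by_cases h : c = o
      · subst h
        have hp : [c].isPrefixOf (c :: t) = true := by simp [List.isPrefixOf]
        simp [PySem.Chars.replace.go, hp, ih (new.reverse ++ acc) n (by simpa using hf)]
      · have hp : [o].isPrefixOf (c :: t) = false := by
          simp [List.isPrefixOf]
          exact fun hh => (h hh.symm).elim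
        simp [PySem.Chars.replace.go, hp, ih (c :: acc) n (by simpa using hf), h]

-- Python's s.replace(o, new) with a one-character o is a per-character flatMap.
theorem pvReplaceSingle (s : List Char) (o : Char) (new : List Char) :
    PySem.Chars.replace s [o] new = s.flatMap (fun c => if c = o then new else [c]) := by
  rw [PySem.Chars.replace, pvGoSingle o new s [] s.length le_rfl]
  simp

-- The String replace loop, moved to the character-list level.
theorem pvFoldlToList (rs : List (String × String)) (t : String) :
    (rs.foldl (fun t p => PySem.Str.replace t p.1 p.2) t).toList
      = rs.foldl (fun l p => PySem.Chars.replace l p.1.toList p.2.toList) t.toList := by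
  induction rs generalizing t with
  | nil => rfl
  | cons r rs ih => simp [List.foldl_cons, ih, PySem.Str.toList_replace]

-- A's whole replacement chain equals B's single translate pass (character-list level):
-- each injected escape string contains no character a LATER replacement rewrites.
theorem pvChainEq (s : List Char) :
    (pvReplacements.foldl (fun l p => PySem.Chars.replace l p.1.toList p.2.toList) s)
      = s.flatMap pvEscChar := by
  simp only [pvReplacements, List.foldl_cons, List.foldl_nil,
    show ("&":String).toList = ['&'] from by decide,
    show ("%":String).toList = ['%'] from by decide,
    show ("$":String).toList = ['$'] from by decide,
    show ("#":String).toList = ['#'] from by decide,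
    show ("_":String).toList = ['_'] from by decide,
    show ("{":String).toList = ['{'] from by decide,
    show ("}":String).toList = ['}'] from by decide,
    show ("~":String).toList = ['~'] from by decide,
    show ("^":String).toList = ['^'] from by decide,
    pvReplaceSingle, List.flatMap_assoc]
  refine List.flatMap_congr (fun c _ => ?_)
  by_cases h1 : c = '&'; · subst h1; decide
  by_cases h2 : c = '%'; · subst h2; decide
  by_cases h3 : c = '$'; · subst h3; decide
  by_cases h4 : c = '#'; · subst h4; decide
  by_cases h5 : c = '_'; · subst h5; decide
  by_cases h6 : c = '{'; · subst h6; decide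
  by_cases h7 : c = '}'; · subst h7; decide
  by_cases h8 : c = '~'; · subst h8; decide
  by_cases h9 : c = '^'; · subst h9; decide
  simp [pvEscChar, h1, h2, h3, h4, h5, h6, h7, h8, h9]

-- The two escape functions agree on every string.
theorem pvEscapeEq (text : String) : escape_latexA text = escape_latexB text := by
  unfold escape_latexA escape_latexB
  by_cases h : text = ""
  · simp [h]
  · rw [if_neg h, if_neg h]
    apply String.toList_inj.mp
    rw [pvFoldlToList, pvChainEq]
    simp

-- A's three-line join equals B's inline concatenation, for any cert_names.
theorem pvAssemble (cn : String) :
    PySem.Str.join "\n" ["\\resumeEducationHeading", "{Certifications}{}", "{" ++ cn ++ "}{}"]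
      = "\\resumeEducationHeading\n{Certifications}{}\n{" ++ cn ++ "}{}" := by
  apply String.toList_inj.mp
  rw [PySem.Str.toList_join, show ("\n":String).toList = ['\n'] from by decide,
      List.map_cons, List.map_cons, List.map_cons, List.map_nil,
      PySem.Chars.join_cons_cons, PySem.Chars.join_cons_cons, PySem.Chars.join_singleton]
  simp only [String.toList_append]
  rw [show ("{Certifications}{}":String).toList = ['{','C','e','r','t','i','f','i','c','a','t','i','o','n','s','}','{','}'] from by decide,
     show ("{":String).toList = ['{'] from by decide,
     show ("}{}":String).toList = ['}','{','}'] from by decide,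
     show ("\\resumeEducationHeading":String).toList = ['\\','r','e','s','u','m','e','E','d','u','c','a','t','i','o','n','H','e','a','d','i','n','g'] from by decide,
     show ("\\resumeEducationHeading\n{Certifications}{}\n{":String).toList = ['\\','r','e','s','u','m','e','E','d','u','c','a','t','i','o','n','H','e','a','d','i','n','g','\n','{','C','e','r','t','i','f','i','c','a','t','i','o','n','s','}','{','}','\n','{'] from by decide]
  simp

-- ===== VERDICT (by name: the statement is the Claim_ definition above) =====
theorem render_certifications_latex_spec : Claim_equal_render_certifications_latex := by
  intro certs _
  unfold Spec_render_certifications_latex render_certifications_latex render_certifications_latex_alt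
  by_cases h : certs = []
  · simp [h]
  · rw [if_neg h, if_neg h]
    simp only [pvEscapeEq]
    exact pvAssemble _
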